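-- pv_equiv track=rewrite | github.com/Mysiax05/Algorithms-and-Data-Structures | Dynamic Programming/Tasks/Wired/wired.py | wired
-- ===== SOURCE A (Python) =====
-- def wired(T):
--     n = len(T)
--     memo = {}
--
--     def f(i, j):
--         if i >= j:
--             return 0
--
--         if (i, j) in memo:
--             return memo[(i, j)]
--
--         best = float('inf')
--
--         for k in range(i + 1, j + 1, 2):
--             left = f(i + 1, k - 1)
--             right = f(k + 1, j)
--             cost = 1 + abs(T[i] - T[k])
--             best = min(best, left + right + cost)
--
--         memo[(i, j)] = best
--         return best
--
--     return f(0, n - 1)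
-- ===== SOURCE B (Python) =====
-- def wired(T):
--     n = len(T)
--     if n < 2:
--         return 0
--     dp = [[0] * (n + 1) for _ in range(n + 1)]
--     for length in range(1, n):
--         for i in range(n - length):
--             j = i + length
--             dp[i][j] = min(dp[i + 1][k - 1] + dp[k + 1][j] + 1 + abs(T[i] - T[k])
--                            for k in range(i + 1, j + 1, 2))
--     return dp[0][n - 1]
-- ===== Notes on version B (the rewrite author's own statement) =====
-- stated objective: alternative
-- what changed: The memoized top-down recursion with a dict cache is replaced by a bottom-up iterative interval DP that fills a 2D table in order of increasing interval length.
import Mathlib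
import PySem

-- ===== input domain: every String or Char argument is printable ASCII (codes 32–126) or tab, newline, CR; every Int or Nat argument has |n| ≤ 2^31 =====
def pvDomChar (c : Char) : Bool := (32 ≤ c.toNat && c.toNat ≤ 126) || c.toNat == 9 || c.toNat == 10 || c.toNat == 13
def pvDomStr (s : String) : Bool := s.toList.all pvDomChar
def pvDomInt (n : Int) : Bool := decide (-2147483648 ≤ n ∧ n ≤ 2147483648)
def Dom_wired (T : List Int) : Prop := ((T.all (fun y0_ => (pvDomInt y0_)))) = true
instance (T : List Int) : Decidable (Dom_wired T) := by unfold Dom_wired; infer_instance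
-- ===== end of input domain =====

-- B replaces A's memoized top-down recursion by a bottom-up iterative interval DP table (alternative decomposition).

-- ===== PORT A =====
-- A's memo dict is a pure cache (checked before computing, written after): it never changes the
-- computed value, so the port is the same recursion without the cache threading.
-- 'best = float('inf'); best = min(best, x)' is modelled by Option Int (none = inf); all compared
-- values are ints, exactly as in Python.  T[i]/T[k] are provably in range here (i, k ∈ [0, n-1]).
def wiredF (T : List Int) (i j : Int) : Int :=
  if i ≥ j then 0
  else
    let best : Option Int := (PySem.List.pyRange (i + 1) (j + 1) 2).attach.foldl
      (fun (best : Option Int) kh =>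
        let k := kh.1
        have hk : k ∈ PySem.List.pyRange (i + 1) (j + 1) 2 := kh.2
        have hmem := (PySem.List.mem_pyRange_iff_of_pos (by norm_num) k).1 hk
        let left := wiredF T (i + 1) (k - 1)
        let right := wiredF T (k + 1) j
        let cost := 1 + |((PySem.List.pyGet? T i).getD 0) - ((PySem.List.pyGet? T k).getD 0)|
        some (match best with
              | none => left + right + cost
              | some b => min b (left + right + cost)))
      none
    best.getD 0  -- the none case is unreachable: the range is nonempty when i < j
termination_by (j - i).toNat
decreasing_by
  · omega
  · omega

def wired (T : List Int) : Int :=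
  wiredF T 0 ((T.length : Int) - 1)

-- ===== PORT B =====
-- dp[i][j] read; out-of-range reads do not occur in Source B (defaults are never used).
def dpGet (dp : List (List Int)) (i j : Int) : Int :=
  ((PySem.List.pyGet? ((PySem.List.pyGet? dp i).getD []) j)).getD 0

-- dp[i][j] = v; i and j are provably nonnegative and in range at every call site in Source B.
def dpSet (dp : List (List Int)) (i j : Int) (v : Int) : List (List Int) :=
  dp.set i.toNat (((PySem.List.pyGet? dp i).getD []).set j.toNat v)

def wired_alt (T : List Int) : Int :=
  let n : Int := T.length
  if n < 2 then 0
  else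
    let dp0 := List.replicate (n + 1).toNat (List.replicate (n + 1).toNat (0 : Int))
    let dp := (PySem.List.pyRange 1 n 1).foldl (fun dp length =>
      (PySem.List.pyRange 0 (n - length) 1).foldl (fun dp i =>
        let j := i + length
        let vals := (PySem.List.pyRange (i + 1) (j + 1) 2).map (fun k =>
          dpGet dp (i + 1) (k - 1) + dpGet dp (k + 1) j + 1 +
            |((PySem.List.pyGet? T i).getD 0) - ((PySem.List.pyGet? T k).getD 0)|)
        dpSet dp i j (match vals with
                      | [] => 0   -- unreachable: i < j, so min's generator is nonempty
                      | v :: vs => vs.foldl min v)) dp) dp0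
    dpGet dp 0 (n - 1)

-- ===== PRECONDITION & SPEC =====
def Spec_wired (T : List Int) (out : Int) : Prop := out = wired_alt T
instance (T : List Int) (out : Int) : Decidable (Spec_wired T out) := by unfold Spec_wired; infer_instance

-- ===== CLAIM (what is proved, stated in full; the proofs are below) =====
def Claim_equal_wired : Prop := ∀ (T : List Int), Dom_wired T → Spec_wired T (wired T)

-- ===== LEMMAS AND PROOFS =====

-- python get with a nonnegative index is List.getD
theorem pvGetD_nonneg {α : Type} (xs : List α) (i : Int) (h : 0 ≤ i) (d : α) :
    (PySem.List.pyGet? xs i).getD d = xs.getD i.toNat d := by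
  simp only [PySem.List.pyGet?, PySem.List.pyIdx?, if_pos h]
  split
  · simp [List.getD]
  · rename_i hlt
    simp [List.getD, List.getElem?_eq_none (show xs.length ≤ i.toNat by omega)]

theorem dpGet_eq (dp : List (List Int)) (i j : Int) (hi : 0 ≤ i) (hj : 0 ≤ j) :
    dpGet dp i j = (dp.getD i.toNat []).getD j.toNat 0 := by
  unfold dpGet
  rw [pvGetD_nonneg dp i hi, pvGetD_nonneg _ j hj]

theorem wiredF_base (T : List Int) (i j : Int) (h : i ≥ j) : wiredF T i j = 0 := by
  rw [wiredF.eq_def, if_pos h]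

-- the k-range is nonempty when i < j
theorem pvRange2_ne_nil (i j : Int) (h : i < j) :
    PySem.List.pyRange (i + 1) (j + 1) 2 ≠ [] := by
  rw [PySem.List.pyRange_of_pos _ _ (by norm_num)]
  simp only [ne_eq, List.map_eq_nil_iff, List.range_eq_nil]
  rw [if_pos (by omega)]
  omega

theorem pvRange2_mem {i j k : Int} (hk : k ∈ PySem.List.pyRange (i + 1) (j + 1) 2) :
    i + 1 ≤ k ∧ k ≤ j := by
  have := (PySem.List.mem_pyRange_iff_of_pos (by norm_num) k).1 hk
  omega

-- folding Python's  best = min(best, f k)  with best starting at float('inf')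
theorem pvFoldOpt (f : Int → Int) (l : List Int) : ∀ (b : Int),
    l.foldl (fun (best : Option Int) k =>
      some (match best with | none => f k | some b => min b (f k))) (some b)
    = some ((l.map f).foldl min b) := by
  induction l with
  | nil => intro b; rfl
  | cons x xs ih => intro b; simp only [List.foldl_cons, List.map_cons]; exact ih (min b (f x))

-- the recurrence wiredF satisfies, in the foldl-min form B's cell computation uses
theorem wiredF_rec (T : List Int) (i j : Int) (h : i < j) :
    wiredF T i j =
      (match (PySem.List.pyRange (i + 1) (j + 1) 2).map (fun k =>
          wiredF T (i + 1) (k - 1) + wiredF T (k + 1) j +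
            (1 + |((PySem.List.pyGet? T i).getD 0) - ((PySem.List.pyGet? T k).getD 0)|)) with
        | [] => 0
        | v :: vs => vs.foldl min v) := by
  rcases hne : PySem.List.pyRange (i + 1) (j + 1) 2 with _ | ⟨k0, ks⟩
  · exact absurd hne (pvRange2_ne_nil i j h)
  · rw [wiredF.eq_def, if_neg (by omega)]
    show ((PySem.List.pyRange (i + 1) (j + 1) 2).attach.foldl
        (fun (best : Option Int) kh =>
          some (match best with
                | none => wiredF T (i + 1) (kh.1 - 1) + wiredF T (kh.1 + 1) j +
                    (1 + |((PySem.List.pyGet? T i).getD 0) - ((PySem.List.pyGet? T kh.1).getD 0)|)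
                | some b => min b (wiredF T (i + 1) (kh.1 - 1) + wiredF T (kh.1 + 1) j +
                    (1 + |((PySem.List.pyGet? T i).getD 0) - ((PySem.List.pyGet? T kh.1).getD 0)|))))
        none).getD 0 = _
    rw [List.foldl_attach (f := fun (best : Option Int) k =>
          some (match best with
                | none => wiredF T (i + 1) (k - 1) + wiredF T (k + 1) j +
                    (1 + |((PySem.List.pyGet? T i).getD 0) - ((PySem.List.pyGet? T k).getD 0)|)
                | some b => min b (wiredF T (i + 1) (k - 1) + wiredF T (k + 1) j +
                    (1 + |((PySem.List.pyGet? T i).getD 0) - ((PySem.List.pyGet? T k).getD 0)|))))]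
    rw [hne]
    simp only [List.foldl_cons, List.map_cons]
    rw [pvFoldOpt]
    rfl

-- B's dp cell expression, named for the proofs
def pvCell (T : List Int) (dp : List (List Int)) (i j : Int) : Int :=
  match (PySem.List.pyRange (i + 1) (j + 1) 2).map (fun k =>
      dpGet dp (i + 1) (k - 1) + dpGet dp (k + 1) j + 1 +
        |((PySem.List.pyGet? T i).getD 0) - ((PySem.List.pyGet? T k).getD 0)|) with
  | [] => 0
  | v :: vs => vs.foldl min v

def pvInner (T : List Int) (L : Int) (dp : List (List Int)) (i : Int) : List (List Int) :=
  dpSet dp i (i + L) (pvCell T dp i (i + L))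

-- the invariant: after lengths < L and, at length L, start indices < m, dp holds wiredF
def pvGood (T : List Int) (L m : Int) (dp : List (List Int)) : Prop :=
  dp.length = T.length + 1 ∧ (∀ r ∈ dp, r.length = T.length + 1) ∧
  ∀ i j : Int, 0 ≤ i → 0 ≤ j →
    dpGet dp i j =
      if i < j ∧ j ≤ (T.length : Int) - 1 ∧ (j - i < L ∨ (j - i = L ∧ i < m))
      then wiredF T i j else 0

theorem wired_alt_eq (T : List Int) :
    wired_alt T = if (T.length : Int) < 2 then 0 else
      dpGet ((PySem.List.pyRange 1 (T.length : Int) 1).foldl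
        (fun dp length =>
          (PySem.List.pyRange 0 ((T.length : Int) - length) 1).foldl (pvInner T length) dp)
        (List.replicate ((T.length : Int) + 1).toNat
          (List.replicate ((T.length : Int) + 1).toNat (0 : Int))))
        0 ((T.length : Int) - 1) := by
  rfl

theorem dpGet_dpSet (dp : List (List Int)) (i j v i' j' : Int)
    (hi : 0 ≤ i) (hj : 0 ≤ j) (hi' : 0 ≤ i') (hj' : 0 ≤ j')
    (hin : i.toNat < dp.length)
    (hjn : j.toNat < ((PySem.List.pyGet? dp i).getD []).length) :
    dpGet (dpSet dp i j v) i' j' = if i' = i ∧ j' = j then v else dpGet dp i' j' := by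
  rw [pvGetD_nonneg dp i hi] at hjn
  rw [dpGet_eq _ _ _ hi' hj', dpGet_eq _ _ _ hi' hj']
  unfold dpSet
  rw [pvGetD_nonneg dp i hi]
  simp only [List.getD, List.getElem?_set]
  by_cases hii : i' = i
  · subst hii
    rw [if_pos (by rfl), if_pos hin]
    simp only [Option.getD_some, List.getElem?_set]
    by_cases hjj : j' = j
    · subst hjj
      simp only [List.getD] at hjn
      rw [if_pos rfl, if_pos hjn]
      simp
    · rw [if_neg (by omega), if_neg (by omega)]
  · rw [if_neg (by omega), if_neg (by omega)]

theorem pvGood_shape_set (T : List Int) (dp : List (List Int)) (i j v : Int)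
    (h1 : dp.length = T.length + 1) (h2 : ∀ r ∈ dp, r.length = T.length + 1)
    (hi : 0 ≤ i) (hin : i.toNat < dp.length) :
    (dpSet dp i j v).length = T.length + 1 ∧
    ∀ r ∈ dpSet dp i j v, r.length = T.length + 1 := by
  unfold dpSet
  refine ⟨by simpa using h1, fun r hr => ?_⟩
  rcases List.mem_or_eq_of_mem_set hr with h | h
  · exact h2 r h
  · subst h
    rw [List.length_set, pvGetD_nonneg dp i hi]
    have : dp.getD i.toNat [] ∈ dp := by
      rw [List.getD, List.getElem?_eq_getElem hin]; exact List.getElem_mem _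
    exact h2 _ this

theorem pvCell_eq (T : List Int) (dp : List (List Int)) (L i : Int)
    (hg : pvGood T L i dp) (hi : 0 ≤ i) (hL : 1 ≤ L)
    (hub : i + L ≤ (T.length : Int) - 1) :
    pvCell T dp i (i + L) = wiredF T i (i + L) := by
  obtain ⟨h1, h2, h3⟩ := hg
  rw [pvCell]
  rw [List.map_congr_left (g := fun k =>
      wiredF T (i + 1) (k - 1) + wiredF T (k + 1) (i + L) +
        (1 + |((PySem.List.pyGet? T i).getD 0) - ((PySem.List.pyGet? T k).getD 0)|))
    (fun k hk => ?_)]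
  · exact (wiredF_rec T i (i + L) (by omega)).symm
  · obtain ⟨hk1, hk2⟩ := pvRange2_mem hk
    have hleft : dpGet dp (i + 1) (k - 1) = wiredF T (i + 1) (k - 1) := by
      by_cases hlt : i + 1 < k - 1
      · rw [h3 (i + 1) (k - 1) (by omega) (by omega),
          if_pos ⟨hlt, by omega, Or.inl (by omega)⟩]
      · rw [h3 (i + 1) (k - 1) (by omega) (by omega), if_neg (by omega),
          wiredF_base T _ _ (by omega)]
    have hright : dpGet dp (k + 1) (i + L) = wiredF T (k + 1) (i + L) := by
      by_cases hlt : k + 1 < i + L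
      · rw [h3 (k + 1) (i + L) (by omega) (by omega),
          if_pos ⟨hlt, by omega, Or.inl (by omega)⟩]
      · rw [h3 (k + 1) (i + L) (by omega) (by omega), if_neg (by omega),
          wiredF_base T _ _ (by omega)]
    rw [hleft, hright]
    ring

theorem pvInner_good (T : List Int) (L i : Int)
    (dp : List (List Int)) (hg : pvGood T L i dp) (hi : 0 ≤ i) (hL : 1 ≤ L)
    (hub : i + L ≤ (T.length : Int) - 1) :
    pvGood T L (i + 1) (pvInner T L dp i) := by
  obtain ⟨h1, h2, h3⟩ := hg
  have hin : i.toNat < dp.length := by rw [h1]; omega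
  have hrow : ((PySem.List.pyGet? dp i).getD []).length = T.length + 1 := by
    rw [pvGetD_nonneg dp i hi]
    refine h2 _ ?_
    rw [List.getD, List.getElem?_eq_getElem hin]; exact List.getElem_mem _
  have hjn : (i + L).toNat < ((PySem.List.pyGet? dp i).getD []).length := by
    rw [hrow]; omega
  have hcell := pvCell_eq T dp L i ⟨h1, h2, h3⟩ hi hL hub
  obtain ⟨s1, s2⟩ := pvGood_shape_set T dp i (i + L) (pvCell T dp i (i + L)) h1 h2 hi hin
  refine ⟨s1, s2, fun i' j' hi' hj' => ?_⟩
  rw [show pvInner T L dp i = dpSet dp i (i + L) (pvCell T dp i (i + L)) from rfl]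
  rw [dpGet_dpSet dp i (i + L) _ i' j' hi (by omega) hi' hj' hin hjn]
  by_cases he : i' = i ∧ j' = i + L
  · obtain ⟨e1, e2⟩ := he
    subst e1; subst e2
    rw [if_pos ⟨rfl, rfl⟩, hcell, if_pos ⟨by omega, by omega, Or.inr ⟨by omega, by omega⟩⟩]
  · rw [if_neg he, h3 i' j' hi' hj']
    have hiff : (i' < j' ∧ j' ≤ (T.length : Int) - 1 ∧
        (j' - i' < L ∨ (j' - i' = L ∧ i' < i))) ↔
        (i' < j' ∧ j' ≤ (T.length : Int) - 1 ∧
        (j' - i' < L ∨ (j' - i' = L ∧ i' < i + 1))) := by omega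
    rw [if_congr hiff rfl rfl]

theorem pvInnerFold_good (T : List Int) (L : Int) (hL : 1 ≤ L) : ∀ (M : Nat) (dp : List (List Int)),
    pvGood T L 0 dp → (M : Int) ≤ (T.length : Int) - L →
    pvGood T L M ((PySem.List.pyRange 0 (M : Int) 1).foldl (pvInner T L) dp) := by
  intro M
  induction M with
  | zero =>
    intro dp hg _
    simpa [PySem.List.pyRange_one_eq_nil le_rfl] using hg
  | succ M ih =>
    intro dp hg hub
    have h1 : ((M + 1 : Nat) : Int) = (M : Int) + 1 := by push_cast; ring
    rw [h1, PySem.List.pyRange_one_succ_right (by positivity), List.foldl_append,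
      List.foldl_cons, List.foldl_nil]
    exact pvInner_good T L (M : Int) _ (ih dp hg (by omega)) (by omega) hL (by omega)

theorem pvGood_shift (T : List Int) (L : Int) (m : Int) (dp : List (List Int))
    (_hL : 1 ≤ L) (hm : (T.length : Int) - L ≤ m)
    (hg : pvGood T L m dp) : pvGood T (L + 1) 0 dp := by
  obtain ⟨h1, h2, h3⟩ := hg
  refine ⟨h1, h2, fun i j hi hj => ?_⟩
  rw [h3 i j hi hj]
  have hiff : (i < j ∧ j ≤ (T.length : Int) - 1 ∧
      (j - i < L ∨ (j - i = L ∧ i < m))) ↔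
      (i < j ∧ j ≤ (T.length : Int) - 1 ∧
      (j - i < L + 1 ∨ (j - i = L + 1 ∧ i < 0))) := by omega
  rw [if_congr hiff rfl rfl]

theorem pvOuter_good (T : List Int) : ∀ (t : Nat),
    pvGood T ((t : Int) + 1) 0 ((PySem.List.pyRange 1 ((t : Int) + 1) 1).foldl
      (fun dp length =>
        (PySem.List.pyRange 0 ((T.length : Int) - length) 1).foldl (pvInner T length) dp)
      (List.replicate ((T.length : Int) + 1).toNat
        (List.replicate ((T.length : Int) + 1).toNat (0 : Int)))) := by
  intro t
  induction t with
  | zero =>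
    rw [show ((0 : Nat) : Int) + 1 = 1 by norm_num, PySem.List.pyRange_one_eq_nil le_rfl,
      List.foldl_nil]
    refine ⟨by simp, fun r hr => ?_, fun i j hi hj => ?_⟩
    · rw [List.eq_of_mem_replicate hr]; simp
    · rw [if_neg (by omega), dpGet_eq _ _ _ hi hj]
      simp only [List.getD, List.getElem?_replicate]
      split
      · simp only [Option.getD_some, List.getElem?_replicate]
        split <;> simp
      · simp
  | succ t ih =>
    have h1 : ((t + 1 : Nat) : Int) + 1 = ((t : Int) + 1) + 1 := by push_cast; ring
    rw [h1, PySem.List.pyRange_one_succ_right (by omega), List.foldl_append,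
      List.foldl_cons, List.foldl_nil]
    by_cases hNL : 1 ≤ (T.length : Int) - ((t : Int) + 1)
    · have hc : (((T.length : Int) - ((t : Int) + 1)).toNat : Int)
          = (T.length : Int) - ((t : Int) + 1) := by omega
      rw [← hc]
      have hin := pvInnerFold_good T ((t : Int) + 1) (by omega)
        ((T.length : Int) - ((t : Int) + 1)).toNat _ ih (by omega)
      exact pvGood_shift T ((t : Int) + 1) _ _ (by omega) (by omega) hin
    · rw [show PySem.List.pyRange 0 ((T.length : Int) - ((t : Int) + 1)) = []
        from PySem.List.pyRange_one_eq_nil (by omega), List.foldl_nil]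
      exact pvGood_shift T ((t : Int) + 1) 0 _ (by omega) (by omega) ih

-- ===== VERDICT (by name: the statement is the Claim_ definition above) =====
theorem wired_spec : Claim_equal_wired := by
  intro T _
  unfold Spec_wired wired
  rw [wired_alt_eq]
  by_cases h2 : (T.length : Int) < 2
  · rw [if_pos h2, wiredF_base T 0 _ (by omega)]
  · rw [if_neg h2]
    have hg := pvOuter_good T ((T.length : Int) - 1).toNat
    rw [show ((((T.length : Int) - 1).toNat : Int) + 1) = (T.length : Int) by omega] at hg
    rw [hg.2.2 0 ((T.length : Int) - 1) le_rfl (by omega), if_pos (by omega)]
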